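-- pv_equiv track=rewrite | github.com/scylladb/scylladb | test/pylib/cpp/common_cpp_conftest.py | get_disabled_tests
-- ===== SOURCE A (Python) =====
-- ALL_MODES = {
--     'debug': 'Debug',
--     'release': 'RelWithDebInfo',
--     'dev': 'Dev',
--     'sanitize': 'Sanitize',
--     'coverage': 'Coverage',
-- }
--
-- DEBUG_MODES = {
--     'debug': 'Debug',
--     'sanitize': 'Sanitize',
-- }
--
-- def get_disabled_tests(config: dict, modes: list[str]) -> dict[str, set[str]]:
--     """
--     Get the dict with disabled tests.
--     Pytest spawns one process, so all modes should be handled there instead one by one as test.py does.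
--     """
--     disabled_tests = {}
--     for mode in modes:
--         # Skip tests disabled in suite.yaml
--         disabled_tests_for_mode = set(config.get('disable', []))
--         # Skip tests disabled in the specific mode.
--         disabled_tests_for_mode.update(config.get('skip_in_' + mode, []))
--         # If this mode is one of the debug modes, and there are
--         # tests disabled in a debug mode, add these tests to the skip list.
--         if mode in DEBUG_MODES:
--             disabled_tests_for_mode.update(config.get('skip_in_debug_modes', []))
--         # If a test is listed in run_in_<mode>, it should only be enabled in
--         # this mode. Tests not listed in any run_in_<mode> directive should
--         # run in all modes. Inverting this, we should disable all tests
--         # that are listed explicitly in some run_in_<m> where m != mode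
--         #  This, of course, may create ambiguity with skip_* settings,
--         # since the priority of the two is undefined, but oh well.
--         run_in_m = set(config.get('run_in_' + mode, []))
--         for a in ALL_MODES:
--             if a == mode:
--                 continue
--             skip_in_m = set(config.get('run_in_' + a, []))
--             disabled_tests_for_mode.update(skip_in_m - run_in_m)
--         disabled_tests[mode] = disabled_tests_for_mode
--     return disabled_tests
-- ===== SOURCE B (Python) =====
-- ALL_MODES = {
--     'debug': 'Debug',
--     'release': 'RelWithDebInfo',
--     'dev': 'Dev',
--     'sanitize': 'Sanitize',
--     'coverage': 'Coverage',
-- }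
--
-- DEBUG_MODES = {
--     'debug': 'Debug',
--     'sanitize': 'Sanitize',
-- }
--
--
-- def get_disabled_tests(config: dict, modes: list[str]) -> dict[str, set[str]]:
--     # Index-first: the union of every run_in_<a> directive, computed once.
--     total = set()
--     for a in ALL_MODES:
--         total.update(config.get('run_in_' + a, []))
--     disabled_tests = {}
--     for mode in modes:
--         base = set(config.get('disable', []))
--         base.update(config.get('skip_in_' + mode, []))
--         if mode in DEBUG_MODES:
--             base.update(config.get('skip_in_debug_modes', []))
--         # (union over a != mode of run_in_a) - run_in_mode == total - run_in_mode
--         disabled_tests[mode] = base | (total - set(config.get('run_in_' + mode, [])))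
--     return disabled_tests
-- ===== Notes on version B (the rewrite author's own statement) =====
-- stated objective: alternative
-- what changed: B precomputes the union of all run_in_<a> sets once before the loop and computes each mode's extra disabled tests as a single subtraction total - run_in_mode, replacing A's per-mode inner loop over ALL_MODES that rebuilds and subtracts one set per other mode.
import Mathlib
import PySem

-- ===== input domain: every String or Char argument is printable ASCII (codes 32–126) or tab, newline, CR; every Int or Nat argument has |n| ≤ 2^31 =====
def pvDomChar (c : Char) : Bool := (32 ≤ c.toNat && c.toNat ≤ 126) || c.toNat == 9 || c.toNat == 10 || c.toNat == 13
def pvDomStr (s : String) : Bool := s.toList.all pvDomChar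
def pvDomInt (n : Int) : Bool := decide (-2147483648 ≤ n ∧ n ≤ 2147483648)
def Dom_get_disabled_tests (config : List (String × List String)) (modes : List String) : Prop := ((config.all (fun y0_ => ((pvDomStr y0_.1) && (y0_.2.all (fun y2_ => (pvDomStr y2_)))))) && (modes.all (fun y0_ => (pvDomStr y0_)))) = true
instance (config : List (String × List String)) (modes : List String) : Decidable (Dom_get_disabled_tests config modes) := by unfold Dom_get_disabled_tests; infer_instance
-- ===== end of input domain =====

-- B precomputes the union of all run_in_<a> sets once and replaces A's per-mode inner loop
-- over ALL_MODES by a single set subtraction (alternative decomposition of the same task).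


-- ===== PORT A =====
def ALL_MODES : List (String × String) :=
  [("debug", "Debug"), ("release", "RelWithDebInfo"), ("dev", "Dev"),
   ("sanitize", "Sanitize"), ("coverage", "Coverage")]

def DEBUG_MODES : List (String × String) := [("debug", "Debug"), ("sanitize", "Sanitize")]

-- config.get(k, []) — first matching key of the association list, default []
def cfgGet (config : List (String × List String)) (k : String) : List String :=
  match config.find? (fun kv => kv.1 == k) with
  | some kv => kv.2
  | none => []

def get_disabled_tests (config : List (String × List String)) (modes : List String) : List (String × List String) :=
  (modes.foldl (fun (d : PySem.Dict String (PySem.Set String)) mode =>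
    let s0 : PySem.Set String := PySem.Set.ofList (cfgGet config "disable")
    let s1 : PySem.Set String := PySem.Set.update s0 (cfgGet config ("skip_in_" ++ mode))
    let s2 : PySem.Set String :=
      if (DEBUG_MODES.map Prod.fst).contains mode then
        PySem.Set.update s1 (cfgGet config "skip_in_debug_modes")
      else s1
    let run_in_m : PySem.Set String := PySem.Set.ofList (cfgGet config ("run_in_" ++ mode))
    let s3 : PySem.Set String := (ALL_MODES.map Prod.fst).foldl (fun s a =>
      if a == mode then s
      else PySem.Set.update s (PySem.Set.diff (PySem.Set.ofList (cfgGet config ("run_in_" ++ a))) run_in_m)) s2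
    d.insert mode s3) PySem.Dict.empty).items

-- ===== PORT B =====
def get_disabled_tests_alt (config : List (String × List String)) (modes : List String) : List (String × List String) :=
  let total : PySem.Set String := (ALL_MODES.map Prod.fst).foldl
    (fun s a => PySem.Set.update s (cfgGet config ("run_in_" ++ a))) PySem.Set.empty
  (modes.foldl (fun (d : PySem.Dict String (PySem.Set String)) mode =>
    let base0 : PySem.Set String := PySem.Set.ofList (cfgGet config "disable")
    let base1 : PySem.Set String := PySem.Set.update base0 (cfgGet config ("skip_in_" ++ mode))
    let base : PySem.Set String :=
      if (DEBUG_MODES.map Prod.fst).contains mode then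
        PySem.Set.update base1 (cfgGet config "skip_in_debug_modes")
      else base1
    d.insert mode (PySem.Set.union base
      (PySem.Set.diff total (PySem.Set.ofList (cfgGet config ("run_in_" ++ mode)))))) PySem.Dict.empty).items

-- ===== PRECONDITION & SPEC =====
def Spec_get_disabled_tests (config : List (String × List String)) (modes : List String) (out : List (String × List String)) : Prop := out = get_disabled_tests_alt config modes
instance (config : List (String × List String)) (modes : List String) (out : List (String × List String)) : Decidable (Spec_get_disabled_tests config modes out) := by unfold Spec_get_disabled_tests; infer_instance

-- ===== CLAIM (what is proved, stated in full; the proofs are below) =====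
def Claim_equal_get_disabled_tests : Prop := ∀ (config : List (String × List String)) (modes : List String), Dom_get_disabled_tests config modes → Spec_get_disabled_tests config modes (get_disabled_tests config modes)

-- ===== LEMMAS AND PROOFS =====

-- the per-key contribution A's inner loop adds: nothing for mode itself, run_in_a - run_in_mode otherwise
def pvG (run : String → List String) (mode : String) (a : String) : List String :=
  if a == mode then [] else PySem.Set.diff (PySem.Set.ofList (run a)) (PySem.Set.ofList (run mode))

theorem foldl_update_eq (f : String → List String) (ks : List String) (s : PySem.Set String) :
    ks.foldl (fun s a => PySem.Set.update s (f a)) s = PySem.Set.update s (ks.flatMap f) := by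
  induction ks generalizing s with
  | nil => rfl
  | cons a rest ih =>
    simp only [List.foldl_cons, List.flatMap_cons, ih]
    show _ = (f a ++ rest.flatMap f).foldl PySem.Set.add s
    rw [List.foldl_append]
    rfl

-- PySem.Set.diff is membership-filtering (definitional; local name so it can be cited in rw)
theorem diff_def (s t : PySem.Set String) :
    PySem.Set.diff s t = s.filter (fun x => !(PySem.Set.contains t x)) := rfl

theorem contains_filter_eq (L : List String) (p : String → Bool) (y : String) (hp : p y = true) :
    PySem.Set.contains (L.filter p) y = PySem.Set.contains L y := by
  rw [Bool.eq_iff_iff, PySem.Set.contains_iff, PySem.Set.contains_iff, List.mem_filter]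
  simp [hp]

-- the order-exact identity behind B: the inner-loop union equals (union of all run_in_a) - run_in_mode
theorem ofList_flatMap_pvG (run : String → List String) (mode : String) (ks : List String) :
    PySem.Set.ofList (ks.flatMap (pvG run mode))
      = PySem.Set.diff (PySem.Set.ofList (ks.flatMap run)) (PySem.Set.ofList (run mode)) := by
  induction ks using List.reverseRecOn with
  | nil => rfl
  | append_singleton ks a ih =>
    rw [List.flatMap_append, List.flatMap_append]
    simp only [List.flatMap_cons, List.flatMap_nil, List.append_nil]
    rw [PySem.Set.ofList_append, PySem.Set.ofList_append, ih,
        PySem.Set.update_eq_append_filter, PySem.Set.update_eq_append_filter]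
    simp only [diff_def, List.filter_append]
    congr 1
    by_cases hm : a == mode
    · have ha : a = mode := by simpa using hm
      subst ha
      rw [show pvG run a a = [] by simp [pvG]]
      rw [show PySem.Set.ofList ([] : List String) = [] from rfl, List.filter_nil]
      symm
      rw [List.filter_filter, List.filter_eq_nil_iff]
      intro y hy
      have hmem : PySem.Set.contains (PySem.Set.ofList (run a)) y = true :=
        (PySem.Set.contains_iff _ _).2 hy
      simp only [hmem, Bool.not_true, Bool.false_and]
      exact Bool.false_ne_true
    · rw [show PySem.Set.ofList (pvG run mode a)
            = List.filter (fun x => !(PySem.Set.ofList (run mode)).contains x) (PySem.Set.ofList (run a)) by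
          rw [show pvG run mode a
                = PySem.Set.diff (PySem.Set.ofList (run a)) (PySem.Set.ofList (run mode)) by simp [pvG, hm],
              diff_def]
          exact PySem.Set.ofList_eq_self_of_nodup _ (List.Nodup.filter _ (PySem.Set.nodup_ofList (run a)))]
      rw [List.filter_filter, List.filter_filter]
      apply List.filter_congr
      intro y hy
      by_cases hp : PySem.Set.contains (PySem.Set.ofList (run mode)) y = true
      · simp only [hp, Bool.not_true, Bool.false_and, Bool.and_false]
      · rw [Bool.not_eq_true] at hp
        simp only [hp, Bool.not_false, Bool.true_and, Bool.and_true]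
        rw [contains_filter_eq _ _ _ (by simp only [hp, Bool.not_false])]

theorem modeval (run : String → List String) (mode : String) (s2 : PySem.Set String) (ks : List String) :
    ks.foldl (fun s a => if a == mode then s
        else PySem.Set.update s (PySem.Set.diff (PySem.Set.ofList (run a)) (PySem.Set.ofList (run mode)))) s2
      = PySem.Set.union s2 (PySem.Set.diff
          (ks.foldl (fun s a => PySem.Set.update s (run a)) PySem.Set.empty)
          (PySem.Set.ofList (run mode))) := by
  have hstep : (fun (s : PySem.Set String) a => if a == mode then s
        else PySem.Set.update s (PySem.Set.diff (PySem.Set.ofList (run a)) (PySem.Set.ofList (run mode))))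
      = (fun s a => PySem.Set.update s (pvG run mode a)) := by
    funext s a
    by_cases h : a == mode
    · simp [pvG, h]
    · simp [pvG, h]
  rw [hstep, foldl_update_eq, foldl_update_eq]
  show PySem.Set.update s2 _ = PySem.Set.update s2 _
  rw [PySem.Set.update_eq_append_filter, PySem.Set.update_eq_append_filter]
  congr 1
  rw [ofList_flatMap_pvG]
  rw [show PySem.Set.empty.update (ks.flatMap run) = PySem.Set.ofList (ks.flatMap run) from rfl]
  rw [PySem.Set.ofList_eq_self_of_nodup
    (PySem.Set.diff (PySem.Set.ofList (ks.flatMap run)) (PySem.Set.ofList (run mode)))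
    (by rw [diff_def]; exact List.Nodup.filter _ (PySem.Set.nodup_ofList _))]

-- ===== VERDICT (by name: the statement is the Claim_ definition above) =====
theorem get_disabled_tests_spec : Claim_equal_get_disabled_tests := by
  intro config modes _
  show get_disabled_tests config modes = get_disabled_tests_alt config modes
  unfold get_disabled_tests get_disabled_tests_alt
  refine congrArg PySem.Dict.items ?_
  refine List.foldl_ext _ _ _ ?_
  intro d mode hm
  dsimp only
  congr 1
  exact modeval (fun a => cfgGet config ("run_in_" ++ a)) mode _ _
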